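-- pv_equiv track=rewrite | github.com/Drakonkinst/AdventOfCode | 2024/Day03/puzzle2.py | dos_and_donts
-- ===== SOURCE A (Python) =====
-- def dos_and_donts(lines):
--     instructions = []
--     enabled = True # Enabled at the beginning of the program, not each line!
--     for line in lines:
--         index = 0
--         while index < len(line):
--             # When enabled, we only care about when the next disable is, and vice versa
--             if enabled:
--                 # Thank goodness this isn't regex by default
--                 next_disable = line.find("don't()", index)
--                 if next_disable < 0:
--                     instructions.append(line[index:])
--                     break
--                 instructions.append(line[index:next_disable])
--                 index = next_disable + len("don't()")
--                 enabled = False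
--             else:
--                 next_enable = line.find("do()", index)
--                 if next_enable < 0:
--                     break
--                 index = next_enable + len("do()")
--                 enabled = True
--     return instructions
-- ===== SOURCE B (Python) =====
-- def dos_and_donts(lines):
--     out = []
--     enabled = True
--     for line in lines:
--         n = len(line)
--         i = 0
--         seg = []
--         while i < n:
--             if enabled:
--                 if line.startswith("don't()", i):
--                     out.append(''.join(seg))
--                     seg = []
--                     enabled = False
--                     i += 7
--                 else:
--                     seg.append(line[i])
--                     i += 1
--             else:
--                 if line.startswith("do()", i):
--                     enabled = True
--                     i += 4
--                 else:
--                     i += 1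
--         if enabled and seg:
--             out.append(''.join(seg))
--     return out
-- ===== Notes on version B (the rewrite author's own statement) =====
-- stated objective: alternative
-- what changed: A repeatedly calls str.find for the next marker and appends slices while jumping the index; B is a single left-to-right character state machine that checks startswith at the current position and accumulates the enabled segment char by char.
import Mathlib
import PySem

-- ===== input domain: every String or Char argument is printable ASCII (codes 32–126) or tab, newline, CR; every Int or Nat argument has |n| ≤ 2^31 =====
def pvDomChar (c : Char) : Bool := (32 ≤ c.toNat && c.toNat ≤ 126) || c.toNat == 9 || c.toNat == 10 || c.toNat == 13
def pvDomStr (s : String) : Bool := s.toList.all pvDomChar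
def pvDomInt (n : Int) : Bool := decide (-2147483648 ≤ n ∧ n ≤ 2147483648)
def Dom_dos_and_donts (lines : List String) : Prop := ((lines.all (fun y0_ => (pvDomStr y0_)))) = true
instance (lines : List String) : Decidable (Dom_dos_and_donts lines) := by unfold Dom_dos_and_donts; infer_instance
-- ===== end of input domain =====

-- B replaces A's repeated str.find jumps + slicing by a single left-to-right character
-- state machine with a segment accumulator (objective: alternative; return value only, no mutation).

-- ===== PORT A =====
-- "don't()" and "do()" as char lists
def pvPat7 : List Char := ['d', 'o', 'n', '\'', 't', '(', ')']
def pvPat4 : List Char := ['d', 'o', '(', ')']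

-- A's inner while loop; fuel is only a totality guard (index grows by ≥ 4 each
-- iteration, so fuel = line.length + 1 is never exhausted — proved in the lemmas).
-- index stays a Nat; in the branch taking nd.toNat, nd ≥ 0 was just checked, so toNat is exact.
def pvLineA (line : List Char) : Nat → Bool → Nat → List String → Bool × List String
  | 0, enabled, _, acc => (enabled, acc)
  | fuel + 1, enabled, index, acc =>
    if index < line.length then
      if enabled then
        -- next_disable = line.find("don't()", index)
        let nd := PySem.Chars.findFrom line pvPat7 (index : Int)
        if nd < 0 then
          -- instructions.append(line[index:]); break
          (enabled, acc ++ [String.ofList (PySem.List.slice line (some (index : Int)))])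
        else
          -- instructions.append(line[index:next_disable]); index = next_disable + 7; enabled = False
          pvLineA line fuel false (nd.toNat + 7)
            (acc ++ [String.ofList (PySem.List.slice line (some (index : Int)) (some nd))])
      else
        -- next_enable = line.find("do()", index)
        let ne := PySem.Chars.findFrom line pvPat4 (index : Int)
        if ne < 0 then (enabled, acc)
        else pvLineA line fuel true (ne.toNat + 4) acc
    else (enabled, acc)

def dos_and_donts (lines : List String) : List String :=
  (lines.foldl (fun st line => pvLineA line.toList (line.toList.length + 1) st.1 0 st.2)
    (true, ([] : List String))).2

-- ===== PORT B =====
-- B's while loop over i with line.startswith(pat, i): the current suffix line[i:] is the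
-- recursion argument, seg is the pending enabled segment, acc the output list.
def pvLineB (s : List Char) (enabled : Bool) (seg : List Char) (acc : List String) :
    Bool × List String :=
  if enabled then
    if h7 : PySem.Chars.startswith s pvPat7 then
      pvLineB (s.drop 7) false [] (acc ++ [String.ofList seg])
    else
      match s with
      | [] => (true, if seg.isEmpty then acc else acc ++ [String.ofList seg])
      | c :: r => pvLineB r true (seg ++ [c]) acc
  else
    if h4 : PySem.Chars.startswith s pvPat4 then
      pvLineB (s.drop 4) true seg acc
    else
      match s with
      | [] => (false, acc)
      | _ :: r => pvLineB r false seg acc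
termination_by s.length
decreasing_by
  · have h := ((PySem.Chars.startswith_iff s pvPat7).mp h7).length_le
    simp [pvPat7] at h
    simp
    omega
  · simp
  · have h := ((PySem.Chars.startswith_iff s pvPat4).mp h4).length_le
    simp [pvPat4] at h
    simp
    omega
  · simp

def dos_and_donts_alt (lines : List String) : List String :=
  (lines.foldl (fun st line => pvLineB line.toList st.1 [] st.2)
    (true, ([] : List String))).2

-- ===== PRECONDITION & SPEC =====
def Spec_dos_and_donts (lines : List String) (out : List String) : Prop := out = dos_and_donts_alt lines
instance (lines : List String) (out : List String) : Decidable (Spec_dos_and_donts lines out) := by unfold Spec_dos_and_donts; infer_instance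

-- ===== CLAIM (what is proved, stated in full; the proofs are below) =====
def Claim_equal_dos_and_donts : Prop := ∀ (lines : List String), Dom_dos_and_donts lines → Spec_dos_and_donts lines (dos_and_donts lines)

-- ===== LEMMAS AND PROOFS =====

-- B scans the whole suffix when "don't()" does not occur in it.
lemma pvB_scanE_nofind (s : List Char) : ∀ (seg : List Char) (acc : List String),
    ¬ pvPat7 <:+: s →
    pvLineB s true seg acc =
      (true, if (seg ++ s).isEmpty then acc else acc ++ [String.ofList (seg ++ s)]) := by
  induction s with
  | nil =>
    intro seg acc _
    rw [pvLineB]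
    simp [show PySem.Chars.startswith [] pvPat7 = false from by decide]
  | cons c r ih =>
    intro seg acc h
    have hpre : PySem.Chars.startswith (c :: r) pvPat7 = false := by
      simp only [Bool.eq_false_iff, ne_eq, PySem.Chars.startswith_iff]
      exact fun hp => h hp.isInfix
    rw [pvLineB]
    simp only [if_true, hpre, Bool.false_eq_true, dite_false]
    rw [ih (seg ++ [c]) acc (fun hi => h (List.infix_cons hi))]
    simp [List.append_assoc]

-- B reaches the first occurrence of "don't()" (at position k), emitting the segment.
lemma pvB_scanE_find (k : Nat) : ∀ (s seg : List Char) (acc : List String),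
    pvPat7 <+: s.drop k → (∀ i < k, ¬ pvPat7 <+: s.drop i) →
    pvLineB s true seg acc =
      pvLineB (s.drop (k + 7)) false [] (acc ++ [String.ofList (seg ++ s.take k)]) := by
  induction k with
  | zero =>
    intro s seg acc hp _
    have h7 : PySem.Chars.startswith s pvPat7 = true :=
      (PySem.Chars.startswith_iff s pvPat7).mpr (by simpa using hp)
    rw [pvLineB]
    simp [h7]
  | succ k ih =>
    intro s seg acc hp hmin
    cases s with
    | nil =>
      rw [List.drop_nil] at hp
      have := List.prefix_nil.mp hp
      simp [pvPat7] at this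
    | cons c r =>
      have h0 : ¬ (pvPat7 <+: (c :: r)) := by simpa using hmin 0 (Nat.succ_pos k)
      have hpre : PySem.Chars.startswith (c :: r) pvPat7 = false := by
        simp only [Bool.eq_false_iff, ne_eq, PySem.Chars.startswith_iff]
        exact h0
      rw [pvLineB]
      simp only [if_true, hpre, Bool.false_eq_true, dite_false]
      rw [ih r (seg ++ [c]) acc (by simpa using hp)
        (fun i hi => by simpa using hmin (i + 1) (by omega))]
      have hd : (c :: r).drop (k + 1 + 7) = r.drop (k + 7) := by
        have : k + 1 + 7 = (k + 7) + 1 := by omega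
        rw [this, List.drop_succ_cons]
      rw [hd]
      simp [List.append_assoc]

lemma pvB_scanD_nofind (s : List Char) : ∀ (seg : List Char) (acc : List String),
    ¬ pvPat4 <:+: s → pvLineB s false seg acc = (false, acc) := by
  induction s with
  | nil =>
    intro seg acc _
    rw [pvLineB]
    simp [show PySem.Chars.startswith [] pvPat4 = false from by decide]
  | cons c r ih =>
    intro seg acc h
    have hpre : PySem.Chars.startswith (c :: r) pvPat4 = false := by
      simp only [Bool.eq_false_iff, ne_eq, PySem.Chars.startswith_iff]
      exact fun hp => h hp.isInfix
    rw [pvLineB]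
    simp only [Bool.false_eq_true, if_false, hpre, dite_false]
    exact ih seg acc (fun hi => h (List.infix_cons hi))

lemma pvB_scanD_find (k : Nat) : ∀ (s seg : List Char) (acc : List String),
    pvPat4 <+: s.drop k → (∀ i < k, ¬ pvPat4 <+: s.drop i) →
    pvLineB s false seg acc = pvLineB (s.drop (k + 4)) true seg acc := by
  induction k with
  | zero =>
    intro s seg acc hp _
    have h4 : PySem.Chars.startswith s pvPat4 = true :=
      (PySem.Chars.startswith_iff s pvPat4).mpr (by simpa using hp)
    rw [pvLineB]
    simp [h4]
  | succ k ih =>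
    intro s seg acc hp hmin
    cases s with
    | nil =>
      rw [List.drop_nil] at hp
      have := List.prefix_nil.mp hp
      simp [pvPat4] at this
    | cons c r =>
      have h0 : ¬ (pvPat4 <+: (c :: r)) := by simpa using hmin 0 (Nat.succ_pos k)
      have hpre : PySem.Chars.startswith (c :: r) pvPat4 = false := by
        simp only [Bool.eq_false_iff, ne_eq, PySem.Chars.startswith_iff]
        exact h0
      rw [pvLineB]
      simp only [Bool.false_eq_true, if_false, hpre, dite_false]
      rw [ih r seg acc (by simpa using hp)
        (fun i hi => by simpa using hmin (i + 1) (by omega))]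
      have hd : (c :: r).drop (k + 1 + 4) = r.drop (k + 4) := by
        have : k + 1 + 4 = (k + 4) + 1 := by omega
        rw [this, List.drop_succ_cons]
      rw [hd]

-- Main per-line lemma: A's index loop equals B's machine on the remaining suffix.
lemma pvLine_eq (line : List Char) : ∀ (fuel index : Nat) (enabled : Bool) (acc : List String),
    index ≤ line.length → line.length - index < fuel →
    pvLineA line fuel enabled index acc = pvLineB (line.drop index) enabled [] acc := by
  intro fuel
  induction fuel with
  | zero => intro index enabled acc _ h; omega
  | succ fuel ih =>
    intro index enabled acc hle hfuel
    by_cases hidx : index < line.length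
    · have hdl : (line.drop index).length = line.length - index := by simp
      cases enabled with
      | true =>
        rw [pvLineA]
        simp only [if_pos hidx, if_true]
        rw [PySem.Chars.findFrom_natCast line pvPat7 index hle]
        by_cases hf : PySem.Chars.find (line.drop index) pvPat7 = -1
        · rw [if_pos hf]
          simp only [show ((-1 : Int) < 0) = True from by norm_num, if_true]
          rw [pvB_scanE_nofind _ [] acc
            ((PySem.Chars.find_eq_neg_one_iff _ _).mp hf)]
          rw [PySem.List.slice_from line (by positivity)]
          simp only [Int.toNat_natCast, List.nil_append]
          have hne : (line.drop index).isEmpty = false := by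
            simp [List.drop_eq_nil_iff]
            omega
          rw [hne]
          simp
        · rw [if_neg hf]
          have hf0 : 0 ≤ PySem.Chars.find (line.drop index) pvPat7 := by
            have := PySem.Chars.neg_one_le_find (line.drop index) pvPat7
            omega
          obtain ⟨hp, hmin⟩ := PySem.Chars.find_spec (s := line.drop index) (sub := pvPat7) hf0
          generalize hfdef : PySem.Chars.find (line.drop index) pvPat7 = f at hf0 hp hmin ⊢
          have hlen7 : f.toNat + 7 ≤ line.length - index := by
            have h1 := hp.length_le
            simp [pvPat7] at h1
            omega
          have hnlt : ¬ ((index : Int) + f < 0) := by omega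
          rw [if_neg hnlt]
          have hFt : ((index : Int) + f).toNat = index + f.toNat := by omega
          have hFcast : (index : Int) + f = ((index + f.toNat : Nat) : Int) := by omega
          rw [hFt, hFcast, PySem.List.slice_natCast]
          have hslice : List.take (index + f.toNat - index) (List.drop index line)
              = (line.drop index).take f.toNat := by
            congr 1
            omega
          rw [hslice]
          have hfn : index + f.toNat + 7 ≤ line.length := by omega
          have hfu : line.length - (index + f.toNat + 7) < fuel := by omega
          rw [ih (index + f.toNat + 7) false
            (acc ++ [String.ofList ((line.drop index).take f.toNat)]) hfn hfu]
          rw [pvB_scanE_find f.toNat (line.drop index) [] acc hp hmin]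
          rw [List.drop_drop]
          simp [Nat.add_assoc]
      | false =>
        rw [pvLineA]
        simp only [if_pos hidx, Bool.false_eq_true, if_false]
        rw [PySem.Chars.findFrom_natCast line pvPat4 index hle]
        by_cases hf : PySem.Chars.find (line.drop index) pvPat4 = -1
        · rw [if_pos hf]
          simp only [show ((-1 : Int) < 0) = True from by norm_num, if_true]
          rw [pvB_scanD_nofind _ [] acc
            ((PySem.Chars.find_eq_neg_one_iff _ _).mp hf)]
        · rw [if_neg hf]
          have hf0 : 0 ≤ PySem.Chars.find (line.drop index) pvPat4 := by
            have := PySem.Chars.neg_one_le_find (line.drop index) pvPat4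
            omega
          obtain ⟨hp, hmin⟩ := PySem.Chars.find_spec (s := line.drop index) (sub := pvPat4) hf0
          generalize hfdef : PySem.Chars.find (line.drop index) pvPat4 = f at hf0 hp hmin ⊢
          have hlen4 : f.toNat + 4 ≤ line.length - index := by
            have h1 := hp.length_le
            simp [pvPat4] at h1
            omega
          have hnlt : ¬ ((index : Int) + f < 0) := by omega
          rw [if_neg hnlt]
          have hFt : ((index : Int) + f).toNat = index + f.toNat := by omega
          rw [hFt]
          have hfn : index + f.toNat + 4 ≤ line.length := by omega
          have hfu : line.length - (index + f.toNat + 4) < fuel := by omega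
          rw [ih (index + f.toNat + 4) true acc hfn hfu]
          rw [pvB_scanD_find f.toNat (line.drop index) [] acc hp hmin]
          rw [List.drop_drop]
          simp [Nat.add_assoc]
    · have hdrop : line.drop index = [] := by
        rw [List.drop_eq_nil_iff]
        omega
      rw [pvLineA]
      simp only [if_neg hidx]
      rw [hdrop]
      cases enabled with
      | true =>
        rw [pvLineB]
        simp [show PySem.Chars.startswith [] pvPat7 = false from by decide]
      | false =>
        rw [pvLineB]
        simp [show PySem.Chars.startswith [] pvPat4 = false from by decide]

-- ===== VERDICT (by name: the statement is the Claim_ definition above) =====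
theorem dos_and_donts_spec : Claim_equal_dos_and_donts := by
  intro lines _
  unfold Spec_dos_and_donts dos_and_donts dos_and_donts_alt
  have : (fun (st : Bool × List String) (line : String) =>
        pvLineA line.toList (line.toList.length + 1) st.1 0 st.2) =
      fun st line => pvLineB line.toList st.1 [] st.2 := by
    funext st line
    have := pvLine_eq line.toList (line.toList.length + 1) 0 st.1 st.2
      (by omega) (by omega)
    simpa using this
  rw [this]
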